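-- pv_equiv track=rewrite | github.com/Leobertucci/Estudo-em-teoria-dos-Grafos | isomorphism.py | list_homo
-- ===== SOURCE A (Python) =====
-- def gen_func(n, m):
--     funcoes = []
--     mapsto = [0] * n
--     while mapsto != [m - 1] * n:
--         funcoes.append(tuple(mapsto.copy()))
--         mapsto[n - 1] += 1
--         for i in range(1, n):
--             if mapsto[n - i] >= m:
--                 mapsto[n - i] = 0
--                 mapsto[n - i - 1] += 1
--     funcoes.append(tuple(mapsto))
--     return funcoes
--
-- def edges(G):
--     edgs = []
--     for i in range(len(G)):
--         for j in range(i + 1, len(G)):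
--             if G[i][j]: edgs.append((i, j))
--     return edgs
--
-- def list_homo(G, H):
--     lista_homo = []
--     for f in gen_func(len(G), len(H)):
--         homo = True
--         # vejamos se f é homomorfismo:
--         for (i, j) in edges(G):
--             if H[f[i]][f[j]] == 0:
--                 homo = False
--                 break
--         if homo: lista_homo.append(f)
--     return lista_homo
-- ===== SOURCE B (Python) =====
-- def list_homo(G, H):
--     n, m = len(G), len(H)
--     edgs = [(i, j) for i in range(n) for j in range(i + 1, n) if G[i][j]]
--     by_last = [[e for e in edgs if e[1] == v] for v in range(n)]
--     def dfs(f):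
--         v = len(f)
--         if v == n:
--             return [tuple(f)]
--         out = []
--         for c in range(m):
--             g = f + [c]
--             if all(H[g[i]][g[j]] != 0 for (i, j) in by_last[v]):
--                 out.extend(dfs(g))
--         return out
--     return dfs([])
-- ===== Notes on version B (the rewrite author's own statement) =====
-- stated objective: alternative
-- what changed: A enumerates all len(H)^len(G) maps with an odometer while-loop and filters each against edges(G) recomputed per map; B precomputes the edge list once, groups edges by their larger endpoint, and does a backtracking DFS that assigns vertices in order and prunes a partial assignment as soon as one of its edges is not mapped to an edge of H (intended as faster via pruning; measured only 1.44x at the largest size both finished, so not claimed).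
import Mathlib
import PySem

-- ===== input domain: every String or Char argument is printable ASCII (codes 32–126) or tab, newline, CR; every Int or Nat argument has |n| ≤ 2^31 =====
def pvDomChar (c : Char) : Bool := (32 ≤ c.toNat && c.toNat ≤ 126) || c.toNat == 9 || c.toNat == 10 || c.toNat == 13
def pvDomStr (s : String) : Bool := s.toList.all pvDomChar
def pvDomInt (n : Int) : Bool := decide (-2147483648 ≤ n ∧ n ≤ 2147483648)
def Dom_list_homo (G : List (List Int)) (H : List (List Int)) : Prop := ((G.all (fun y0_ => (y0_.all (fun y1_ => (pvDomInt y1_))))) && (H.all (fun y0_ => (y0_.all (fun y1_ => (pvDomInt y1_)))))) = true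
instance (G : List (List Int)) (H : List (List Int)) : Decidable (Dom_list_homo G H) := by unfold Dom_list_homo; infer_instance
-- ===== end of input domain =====

-- B replaces A's generate-all-maps-then-filter by a backtracking DFS with edge pruning (edges precomputed once); equal output on Pre_.

-- ===== PORT A =====
-- carry step of gen_func's inner `for i in range(1, n)` loop, at position p = n - i
def pvCarryP (m : Int) (ms : List Int) (p : Nat) : List Int :=
  if m ≤ ms.getD p 0 then
    let ms1 := ms.set p 0
    ms1.set (p - 1) (ms1.getD (p - 1) 0 + 1)
  else ms

-- one iteration of gen_func's while body after the append: mapsto[n-1] += 1, then the carry loop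
def pvStepA (m : Int) (n : Nat) (ms : List Int) : List Int :=
  (List.range' 1 (n - 1)).foldl (fun ms i => pvCarryP m ms (n - i))
    (ms.set (n - 1) (ms.getD (n - 1) 0 + 1))

-- gen_func's while loop; fuel-guarded (fuel m^n suffices whenever the Python loop terminates)
def pvGenLoopA (n : Nat) (m : Int) : Nat → List Int → List (List Int) → List (List Int)
  | 0, ms, acc => acc ++ [ms]
  | fuel+1, ms, acc =>
    if ms = List.replicate n (m - 1) then acc ++ [ms]
    else pvGenLoopA n m fuel (pvStepA m n ms) (acc ++ [ms])

def gen_funcA (n m : Nat) : List (List Int) :=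
  pvGenLoopA n (m : Int) (m ^ n) (List.replicate n 0) []

def edgesA (G : List (List Int)) : List (Nat × Nat) :=
  (List.range G.length).flatMap (fun i =>
    ((List.range' (i + 1) (G.length - (i + 1))).filter
      (fun j => !((G.getD i []).getD j 0 == 0))).map (fun j => (i, j)))

def list_homo (G : List (List Int)) (H : List (List Int)) : List (List Int) :=
  (gen_funcA G.length H.length).foldl
    (fun acc f =>
      if (edgesA G).all
           (fun e => !((H.getD (f.getD e.1 0).toNat []).getD (f.getD e.2 0).toNat 0 == 0))
      then acc ++ [f] else acc) []

-- ===== PORT B =====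
-- `H[g[i]][g[j]] != 0` for the edge e = (i, j)
def pvOk (H : List (List Int)) (g : List Int) (e : Nat × Nat) : Bool :=
  !((H.getD (g.getD e.1 0).toNat []).getD (g.getD e.2 0).toNat 0 == 0)

-- Source B's edge comprehension
def edgesB (G : List (List Int)) : List (Nat × Nat) :=
  (List.range G.length).flatMap (fun i =>
    ((List.range' (i + 1) (G.length - (i + 1))).filter
      (fun j => !((G.getD i []).getD j 0 == 0))).map (fun j => (i, j)))

-- Source B's dfs; structural recursion on rem = n - len(f)
def pvDfsB (H : List (List Int)) (byLast : List (List (Nat × Nat))) (m : Nat) :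
    Nat → List Int → List (List Int)
  | 0, f => [f]
  | rem+1, f =>
    (List.range m).flatMap (fun (c : Nat) =>
      let g := f ++ [(c : Int)]
      if (byLast.getD f.length []).all (pvOk H g) then pvDfsB H byLast m rem g else [])

def list_homo_alt (G : List (List Int)) (H : List (List Int)) : List (List Int) :=
  let n := G.length
  let m := H.length
  let edgs := edgesB G
  let byLast := (List.range n).map (fun v => edgs.filter (fun e => e.2 == v))
  pvDfsB H byLast m n []

-- ===== PRECONDITION & SPEC =====
-- Pre_ excludes exactly the inputs where Python A does not return normally: a row G[i] with
-- i < len(G)-1 shorter than len(G) (IndexError while building edges; the last row is never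
-- indexed), H = [] with G ≠ [] (gen_func's while loop never terminates), and — when G has at
-- least one edge — a row of H shorter than len(H) (IndexError in the homomorphism check).
def Pre_list_homo (G : List (List Int)) (H : List (List Int)) : Prop :=
  (∀ i ∈ List.range (G.length - 1), G.length ≤ (G.getD i []).length) ∧
  (G = [] ∨ H ≠ []) ∧
  ((∃ i ∈ List.range G.length, ∃ j ∈ List.range G.length, i < j ∧ (G.getD i []).getD j 0 ≠ 0) →
    ∀ r ∈ H, H.length ≤ r.length)

instance (G : List (List Int)) (H : List (List Int)) : Decidable (Pre_list_homo G H) := by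
  unfold Pre_list_homo; infer_instance

def pvWitness_list_homo : List (List Int) × List (List Int) :=
  ([[0, 1], [1, 0]], [[0, 1], [1, 0]])

def Spec_list_homo (G : List (List Int)) (H : List (List Int)) (out : List (List Int)) : Prop := out = list_homo_alt G H
instance (G : List (List Int)) (H : List (List Int)) (out : List (List Int)) : Decidable (Spec_list_homo G H out) := by unfold Spec_list_homo; infer_instance

-- ===== CLAIM (what is proved, stated in full; the proofs are below) =====
def Claim_equal_list_homo : Prop := ∀ (G : List (List Int)) (H : List (List Int)), Dom_list_homo G H → Pre_list_homo G H → Spec_list_homo G H (list_homo G H)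

-- ===== LEMMAS AND PROOFS =====

def pvDig (m : Nat) : Nat → Nat → List Int
  | 0, _ => []
  | n+1, k => pvDig m n (k / m) ++ [((k % m : Nat) : Int)]

lemma pvDig_length (m n k : Nat) : (pvDig m n k).length = n := by
  induction n generalizing k with
  | zero => rfl
  | succ n ih => simp [pvDig, ih]

lemma pvDig_getD_lt (m : Nat) (hm : 0 < m) : ∀ (n k p : Nat), p < n →
    (pvDig m n k).getD p 0 < (m : Int) ∧ 0 ≤ (pvDig m n k).getD p 0 := by
  intro n
  induction n with
  | zero => intro k p h; omega
  | succ n ih =>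
    intro k p hp
    by_cases h : p < n
    · rw [show pvDig m (n+1) k = pvDig m n (k / m) ++ [((k % m : Nat) : Int)] from rfl,
         List.getD_append _ _ _ _ (by rw [pvDig_length]; exact h)]
      exact ih (k / m) p h
    · have hpn : p = n := by omega
      have hlen := pvDig_length m n (k / m)
      have hget : (pvDig m (n+1) k).getD p 0 = ((k % m : Nat) : Int) := by
        rw [show pvDig m (n+1) k = pvDig m n (k / m) ++ [((k % m : Nat) : Int)] from rfl,
            List.getD_eq_getElem?_getD, List.getElem?_append_right (by omega)]
        simp [hlen, hpn]
      rw [hget]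
      have := Nat.mod_lt k hm
      constructor <;> [exact_mod_cast this; positivity]

lemma pvCarry_noop (m : Int) : ∀ (ps : List Nat) (ms : List Int),
    (∀ p ∈ ps, ms.getD p 0 < m) → ps.foldl (pvCarryP m) ms = ms := by
  intro ps
  induction ps with
  | nil => intro ms _; rfl
  | cons p ps ih =>
    intro ms h
    have h1 : pvCarryP m ms p = ms := by
      unfold pvCarryP
      rw [if_neg (not_le.mpr (h p (by simp)))]
    rw [List.foldl_cons, h1]
    exact ih ms (fun q hq => h q (by simp [hq]))

lemma pvCarryP_append (m : Int) (u : List Int) (z : Int) (p : Nat)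
    (h1 : 1 ≤ p) (h2 : p < u.length) :
    pvCarryP m (u ++ [z]) p = pvCarryP m u p ++ [z] := by
  unfold pvCarryP
  rw [List.getD_append _ _ _ _ h2]
  split_ifs with h
  · simp only []
    rw [List.set_append_left _ _ h2,
        List.getD_append _ _ _ _ (by simp; omega),
        List.set_append_left _ _ (by simp; omega)]
  · rfl

lemma pvCarry_prefix (m : Int) : ∀ (ps : List Nat) (u : List Int) (z : Int),
    (∀ p ∈ ps, 1 ≤ p ∧ p < u.length) →
    ps.foldl (pvCarryP m) (u ++ [z]) = ps.foldl (pvCarryP m) u ++ [z] := by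
  intro ps
  induction ps with
  | nil => intro u z _; rfl
  | cons p ps ih =>
    intro u z h
    obtain ⟨h1, h2⟩ := h p (by simp)
    rw [List.foldl_cons, List.foldl_cons, pvCarryP_append m u z p h1 h2]
    apply ih
    intro q hq
    have := h q (by simp [hq])
    have hl : (pvCarryP m u p).length = u.length := by
      unfold pvCarryP; split_ifs <;> simp
    omega

lemma pv_inc (m : Nat) (hm : 0 < m) : ∀ (n k : Nat), k + 1 < m ^ n →
    pvStepA (m : Int) n (pvDig m n k) = pvDig m n (k + 1) := by
  intro n
  induction n with
  | zero => intro k h; simp at h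
  | succ n ih =>
    intro k hk1
    have hr : k % m < m := Nat.mod_lt k hm
    have hkeq : m * (k / m) + k % m = k := Nat.div_add_mod k m
    have hlen : (pvDig m n (k / m)).length = n := pvDig_length m n (k / m)
    have hbump : (pvDig m (n+1) k).set (n+1-1) ((pvDig m (n+1) k).getD (n+1-1) 0 + 1)
        = pvDig m n (k / m) ++ [((k % m : Nat) : Int) + 1] := by
      rw [show pvDig m (n+1) k = pvDig m n (k / m) ++ [((k % m : Nat) : Int)] from rfl,
          show n+1-1 = (pvDig m n (k / m)).length from by omega]
      simp
    unfold pvStepA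
    rw [hbump]
    by_cases hcase : k % m + 1 < m
    · -- no carry beyond the last digit
      have hrest : pvDig m (n+1) (k+1) = pvDig m n (k / m) ++ [((k % m : Nat) : Int) + 1] := by
        have hdiv : (k + 1) / m = k / m := by
          rw [show k + 1 = m * (k / m) + (k % m + 1) from by omega,
              Nat.mul_add_div hm, Nat.div_eq_of_lt hcase]
          omega
        have hmod : (k + 1) % m = k % m + 1 := by
          rw [show k + 1 = m * (k / m) + (k % m + 1) from by omega,
              Nat.mul_add_mod, Nat.mod_eq_of_lt hcase]
        rw [show pvDig m (n+1) (k+1) = pvDig m n ((k+1) / m) ++ [(((k+1) % m : Nat) : Int)] from rfl,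
            hdiv, hmod]
        push_cast
        ring_nf
      rw [hrest]
      rcases Nat.eq_zero_or_pos n with hn | hn
      · subst hn; simp
      · rw [show n + 1 - 1 = (n - 1) + 1 from by omega, List.range'_succ, List.foldl_cons]
        have hfirst : pvCarryP (m : Int) (pvDig m n (k / m) ++ [((k % m : Nat) : Int) + 1]) (n + 1 - 1)
            = pvDig m n (k / m) ++ [((k % m : Nat) : Int) + 1] := by
          unfold pvCarryP
          rw [if_neg (by
            rw [show n+1-1 = (pvDig m n (k / m)).length from by omega]
            simp
            omega)]
        rw [hfirst, ← List.foldl_map]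
        apply pvCarry_noop
        intro p hp
        simp only [List.mem_map, List.mem_range'] at hp
        obtain ⟨i, ⟨hi2, hi3⟩, rfl⟩ := hp
        have hplt : n + 1 - i < n := by omega
        rw [List.getD_append _ _ _ _ (by omega)]
        exact (pvDig_getD_lt m hm n (k / m) _ hplt).1
    · -- k % m = m - 1 : the carry propagates into the prefix
      have hk1' : k + 1 = m * (k / m + 1) := by
        have h2 : m * (k / m + 1) = m * (k / m) + m := by ring
        omega
      have hqlt : k / m + 1 < m ^ n := by
        have hpow : m ^ (n+1) = m * m ^ n := by ring
        rw [hk1', hpow] at hk1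
        exact Nat.lt_of_mul_lt_mul_left hk1
      have hrest : pvDig m (n+1) (k+1) = pvDig m n (k / m + 1) ++ [(0 : Int)] := by
        have hdiv : (k + 1) / m = k / m + 1 := by
          rw [hk1', Nat.mul_div_cancel_left _ hm]
        have hmod : (k + 1) % m = 0 := by
          rw [hk1']
          exact Nat.mul_mod_right m _
        rw [show pvDig m (n+1) (k+1) = pvDig m n ((k+1) / m) ++ [(((k+1) % m : Nat) : Int)] from rfl,
            hdiv, hmod]
        norm_num
      rw [hrest]
      rcases Nat.eq_zero_or_pos n with hn | hn
      · subst hn; simp at hqlt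
      · rw [show n + 1 - 1 = (n - 1) + 1 from by omega, List.range'_succ, List.foldl_cons]
        have hfirst : pvCarryP (m : Int) (pvDig m n (k / m) ++ [((k % m : Nat) : Int) + 1]) (n + 1 - 1)
            = (pvDig m n (k / m)).set (n - 1) ((pvDig m n (k / m)).getD (n - 1) 0 + 1) ++ [(0 : Int)] := by
          unfold pvCarryP
          rw [if_pos (by
            rw [show n+1-1 = (pvDig m n (k / m)).length from by omega]
            simp
            omega)]
          simp only []
          rw [show n+1-1 = (pvDig m n (k / m)).length from by omega]
          rw [show (pvDig m n (k / m) ++ [((k % m : Nat) : Int) + 1]).set (pvDig m n (k / m)).length 0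
                = pvDig m n (k / m) ++ [(0 : Int)] from by simp]
          rw [show (pvDig m n (k / m)).length - 1 = n - 1 from by omega]
          rw [List.getD_append _ _ _ _ (by omega), List.set_append_left _ _ (by omega)]
        rw [hfirst, ← List.foldl_map]
        rw [pvCarry_prefix _ _ _ _ (by
          intro p hp
          simp only [List.mem_map, List.mem_range'] at hp
          obtain ⟨i, ⟨hi2, hi3⟩, rfl⟩ := hp
          simp only [List.length_set, hlen]
          omega)]
        have hIH := ih (k / m) hqlt
        unfold pvStepA at hIH
        rw [← List.foldl_map] at hIH
        have hps : ((List.range' 2 (n - 1)).map (fun i => n + 1 - i))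
            = ((List.range' 1 (n - 1)).map (fun i => n - i)) := by
          rw [List.range'_eq_map_range, List.range'_eq_map_range, List.map_map, List.map_map]
          apply List.map_congr_left
          intro j hj
          simp only [Function.comp_apply]
          simp at hj
          omega
        rw [hps, hIH]

lemma pvDig_rep (m : Nat) (hm : 0 < m) : ∀ n, pvDig m n (m ^ n - 1) = List.replicate n ((m : Int) - 1) := by
  intro n
  induction n with
  | zero => rfl
  | succ n ih =>
    have hpow : 0 < m ^ n := pow_pos hm n
    have hgoal : m ^ (n+1) - 1 = m * (m ^ n - 1) + (m - 1) := by
      have : m ^ (n+1) = m * m ^ n := by ring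
      have h2 : m * (m ^ n - 1) = m * m ^ n - m := by
        rw [Nat.mul_sub]; ring_nf
      have h3 : m ≤ m * m ^ n := Nat.le_mul_of_pos_right m hpow
      omega
    have hdiv : (m ^ (n+1) - 1) / m = m ^ n - 1 := by
      rw [hgoal, Nat.mul_add_div hm, Nat.div_eq_of_lt (by omega)]
      omega
    have hmod : (m ^ (n+1) - 1) % m = m - 1 := by
      rw [hgoal, Nat.mul_add_mod, Nat.mod_eq_of_lt (by omega)]
    rw [show pvDig m (n+1) (m^(n+1) - 1)
          = pvDig m n ((m^(n+1) - 1) / m) ++ [(((m^(n+1) - 1) % m : Nat) : Int)] from rfl,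
        hdiv, hmod, ih, List.replicate_succ']
    congr 1
    simp
    omega

lemma pvDig_ne (m : Nat) (hm : 0 < m) : ∀ n k, k + 1 < m ^ n →
    pvDig m n k ≠ List.replicate n ((m : Int) - 1) := by
  intro n
  induction n with
  | zero => intro k h; simp at h
  | succ n ih =>
    intro k hk1 heq
    have hr : k % m < m := Nat.mod_lt k hm
    have hkeq : m * (k / m) + k % m = k := Nat.div_add_mod k m
    rw [show pvDig m (n+1) k = pvDig m n (k / m) ++ [((k % m : Nat) : Int)] from rfl,
        List.replicate_succ'] at heq
    have hlen : (pvDig m n (k / m)).length = n := pvDig_length m n (k / m)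
    obtain ⟨h1, h2⟩ := List.append_inj heq (by simp [hlen])
    have h2' : ((k % m : Nat) : Int) = (m : Int) - 1 := by simpa using h2
    have hrm : k % m = m - 1 := by omega
    by_cases hq : k / m + 1 < m ^ n
    · exact ih (k / m) hq h1
    · -- then k + 1 ≥ m ^ (n+1), contradiction
      have hql : k / m < m ^ n := by
        by_contra hq2
        have : m ^ n * m ≤ (k / m) * m := Nat.mul_le_mul_right m (by omega)
        have hk : (k / m) * m ≤ k := Nat.div_mul_le_self k m
        have : m ^ (n+1) ≤ k := by
          calc m ^ (n+1) = m ^ n * m := by ring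
          _ ≤ (k / m) * m := this
          _ ≤ k := hk
        omega
      have hq' : k / m + 1 = m ^ n := by omega
      have : k + 1 = m ^ (n+1) := by
        have : (k / m + 1) * m = m ^ n * m := by rw [hq']
        have h3 : (k / m + 1) * m = m * (k / m) + m := by ring
        have h4 : m ^ (n + 1) = m ^ n * m := by ring
        omega
      omega

lemma pvDig_zero (m : Nat) : ∀ n, pvDig m n 0 = List.replicate n 0 := by
  intro n
  induction n with
  | zero => rfl
  | succ n ih => simp [pvDig, List.replicate_succ', ih, Nat.zero_div, Nat.zero_mod]

lemma pv_loop (m : Nat) (hm : 0 < m) (n : Nat) : ∀ (fuel k : Nat) (acc : List (List Int)),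
    k < m ^ n → m ^ n - 1 - k ≤ fuel →
    pvGenLoopA n (m : Int) fuel (pvDig m n k) acc
      = acc ++ (List.range' k (m ^ n - k)).map (pvDig m n) := by
  intro fuel
  induction fuel with
  | zero =>
    intro k acc hk hf
    have hk' : k = m ^ n - 1 := by omega
    subst hk'
    have h1 : m ^ n - (m ^ n - 1) = 1 := by have := pow_pos hm n; omega
    rw [h1]
    simp [pvGenLoopA]
  | succ fuel ih =>
    intro k acc hk hf
    by_cases hstop : k = m ^ n - 1
    · subst hstop
      rw [pvGenLoopA, if_pos (pvDig_rep m hm n)]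
      have h1 : m ^ n - (m ^ n - 1) = 1 := by have := pow_pos hm n; omega
      rw [h1]
      simp
    · have hk1 : k + 1 < m ^ n := by omega
      rw [pvGenLoopA, if_neg (pvDig_ne m hm n k hk1), pv_inc m hm n k hk1, ih (k+1) _ hk1 (by omega)]
      rw [show m ^ n - k = (m ^ n - (k+1)) + 1 from by omega, List.range'_succ]
      simp

lemma pv_genf (n m : Nat) (hm : 0 < m) :
    gen_funcA n m = (List.range (m ^ n)).map (pvDig m n) := by
  unfold gen_funcA
  rw [← pvDig_zero m n, pv_loop m hm n (m ^ n) 0 [] (pow_pos hm n) (by omega)]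
  simp [List.range_eq_range']

lemma pv_range_mul (a b : Nat) :
    List.range (a * b) = (List.range a).flatMap (fun q => (List.range b).map (fun c => q * b + c)) := by
  induction a with
  | zero => simp
  | succ a ih =>
    rw [show (a + 1) * b = a * b + b from by ring, List.range_add, ih, List.range_succ,
        List.flatMap_append]
    simp

lemma pvDig_msb (m : Nat) (hm : 0 < m) : ∀ (n c j : Nat), c < m → j < m ^ n →
    pvDig m (n + 1) (c * m ^ n + j) = (c : Int) :: pvDig m n j := by
  intro n
  induction n with
  | zero =>
    intro c j hc hj
    rw [pow_zero] at hj
    have hj0 : j = 0 := by omega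
    subst hj0
    simp [pvDig, Nat.mod_eq_of_lt hc]
  | succ n ih =>
    intro c j hc hj
    have hmod : (c * m ^ (n+1) + j) % m = j % m := by
      rw [show c * m ^ (n+1) + j = m * (c * m ^ n) + j from by ring, Nat.mul_add_mod]
    have hdiv : (c * m ^ (n+1) + j) / m = c * m ^ n + j / m := by
      rw [show c * m ^ (n+1) + j = m * (c * m ^ n) + j from by ring, Nat.mul_add_div hm]
    have hjm : j / m < m ^ n := by
      apply Nat.div_lt_of_lt_mul
      rw [show m * m ^ n = m ^ (n+1) from by ring]
      exact hj
    rw [show pvDig m (n+2) (c * m ^ (n+1) + j)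
          = pvDig m (n+1) ((c * m ^ (n+1) + j) / m) ++ [(((c * m ^ (n+1) + j) % m : Nat) : Int)] from rfl,
        hdiv, hmod, ih c (j / m) hc hjm]
    rfl

lemma pv_mem_edges (G : List (List Int)) (e : Nat × Nat) (he : e ∈ edgesA G) :
    e.1 < e.2 ∧ e.2 < G.length := by
  unfold edgesA at he
  simp only [List.mem_flatMap, List.mem_map, List.mem_filter, List.mem_range, List.mem_range'] at he
  obtain ⟨i, hi, j, ⟨⟨hj1, hj2⟩, _⟩, rfl⟩ := he
  dsimp only
  omega

lemma pv_all_filter_split (l : List (Nat × Nat)) (v : Nat) (q : Nat × Nat → Bool) :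
    (l.filter (fun e => decide (v ≤ e.2))).all q =
      ((l.filter (fun e => e.2 == v)).all q && (l.filter (fun e => decide (v + 1 ≤ e.2))).all q) := by
  induction l with
  | nil => rfl
  | cons e l ih =>
    rcases Nat.lt_trichotomy e.2 v with h | h | h
    · have c1 : decide (v ≤ e.2) = false := by simp; omega
      have c2 : (e.2 == v) = false := by simp; omega
      have c3 : decide (v + 1 ≤ e.2) = false := by simp; omega
      simp only [List.filter_cons, c1, c2, c3, Bool.false_eq_true, if_false]
      exact ih
    · have c1 : decide (v ≤ e.2) = true := by simp; omega
      have c2 : (e.2 == v) = true := by simp; omega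
      have c3 : decide (v + 1 ≤ e.2) = false := by simp; omega
      simp only [List.filter_cons, c1, c2, c3, if_true, Bool.false_eq_true, if_false, List.all_cons]
      rw [ih]
      by_cases hq : q e <;> simp [hq]
    · have c1 : decide (v ≤ e.2) = true := by simp; omega
      have c2 : (e.2 == v) = false := by simp; omega
      have c3 : decide (v + 1 ≤ e.2) = true := by simp; omega
      simp only [List.filter_cons, c1, c2, c3, if_true, Bool.false_eq_true, if_false, List.all_cons]
      rw [ih]
      by_cases hq : q e <;> simp [hq]


lemma pv_all_congr {α : Type} (l : List α) (p q : α → Bool) (h : ∀ x ∈ l, p x = q x) :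
    l.all p = l.all q := by
  induction l with
  | nil => rfl
  | cons x l ih =>
    simp only [List.all_cons, h x (by simp)]
    rw [ih (fun y hy => h y (by simp [hy]))]

lemma pv_byL (n v : Nat) (E : List (Nat × Nat)) (hv : v < n) :
    ((List.range n).map (fun v => E.filter (fun e => e.2 == v))).getD v [] =
      E.filter (fun e => e.2 == v) := by
  rw [List.getD_eq_getElem?_getD, List.getElem?_map, List.getElem?_range hv]
  rfl

lemma pv_ok_prefix (H : List (List Int)) (g₀ t : List Int) (E : List (Nat × Nat)) (v : Nat)
    (hg : g₀.length = v + 1) (hE : ∀ e ∈ E, e.1 < e.2) :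
    (E.filter (fun e => e.2 == v)).all (pvOk H (g₀ ++ t)) =
      (E.filter (fun e => e.2 == v)).all (pvOk H g₀) := by
  apply pv_all_congr
  intro e he
  obtain ⟨heE, hev⟩ := List.mem_filter.mp he
  have hev' : e.2 = v := by simpa using hev
  have he1 : e.1 < e.2 := hE e heE
  unfold pvOk
  rw [List.getD_append _ _ _ _ (by omega), List.getD_append _ _ _ _ (by omega)]

lemma pv_dfs (G H : List (List Int)) (hm : 0 < H.length) : ∀ (rem : Nat) (f : List Int),
    f.length + rem = G.length →
    pvDfsB H ((List.range G.length).map (fun v => (edgesA G).filter (fun e => e.2 == v)))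
        H.length rem f
      = ((List.range (H.length ^ rem)).map (fun j => f ++ pvDig H.length rem j)).filter
          (fun g => ((edgesA G).filter (fun e => decide (f.length ≤ e.2))).all (pvOk H g)) := by
  intro rem
  induction rem with
  | zero =>
    intro f hf
    have hfl : (edgesA G).filter (fun e => decide (f.length ≤ e.2)) = [] := by
      rw [List.filter_eq_nil_iff]
      intro e he
      have := pv_mem_edges G e he
      simp
      omega
    simp [pvDfsB, hfl, pvDig]
  | succ rem ih =>
    intro f hf
    have hv : f.length < G.length := by omega
    rw [pvDfsB]
    rw [show H.length ^ (rem + 1) = H.length * H.length ^ rem from by ring, pv_range_mul,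
        List.map_flatMap, List.filter_flatMap]
    rw [List.flatMap_def, List.flatMap_def]
    apply congrArg List.flatten
    apply List.map_congr_left
    intro c hc
    dsimp only
    have hcm : c < H.length := List.mem_range.mp hc
    rw [List.map_map]
    have hmap : ((List.range (H.length ^ rem)).map
          ((fun k => f ++ pvDig H.length (rem+1) k) ∘ (fun x => c * H.length ^ rem + x)))
        = (List.range (H.length ^ rem)).map (fun j => (f ++ [(c : Int)]) ++ pvDig H.length rem j) := by
      apply List.map_congr_left
      intro j hj
      have hjm : j < H.length ^ rem := List.mem_range.mp hj
      simp only [Function.comp_apply]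
      rw [pvDig_msb H.length hm rem c j hcm hjm]
      simp
    rw [hmap, pv_byL G.length f.length (edgesA G) hv]
    have hg0len : (f ++ [(c : Int)]).length = f.length + 1 := by simp
    have hE1 : ∀ e ∈ edgesA G, e.1 < e.2 := fun e he => (pv_mem_edges G e he).1
    by_cases hcond : ((edgesA G).filter (fun e => e.2 == f.length)).all (pvOk H (f ++ [(c : Int)])) = true
    · rw [if_pos hcond, ih (f ++ [(c : Int)]) (by simp; omega)]
      rw [hg0len]
      apply (List.filter_congr ?_).symm
      intro g hg
      obtain ⟨j, hj, rfl⟩ := List.mem_map.mp hg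
      rw [pv_all_filter_split (edgesA G) f.length
            (pvOk H ((f ++ [(c : Int)]) ++ pvDig H.length rem j)),
          pv_ok_prefix H (f ++ [(c : Int)]) _ (edgesA G) f.length hg0len hE1, hcond,
          Bool.true_and]
    · rw [if_neg hcond, List.filter_eq_nil_iff.mpr ?_]
      intro g hg
      obtain ⟨j, hj, rfl⟩ := List.mem_map.mp hg
      rw [pv_all_filter_split (edgesA G) f.length
            (pvOk H ((f ++ [(c : Int)]) ++ pvDig H.length rem j)),
          pv_ok_prefix H (f ++ [(c : Int)]) _ (edgesA G) f.length hg0len hE1]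
      simp only [Bool.and_eq_true, not_and]
      intro hcc
      exact absurd hcc hcond

lemma pv_foldl_if_filter {α : Type} (p : α → Bool) :
    ∀ (l : List α) (acc : List α),
      l.foldl (fun acc x => if p x then acc ++ [x] else acc) acc = acc ++ l.filter p := by
  intro l
  induction l with
  | nil => intro acc; simp
  | cons x l ih =>
    intro acc
    by_cases h : p x <;> simp [List.foldl_cons, h, ih]

lemma pv_A_side (G H : List (List Int)) (hm : 0 < H.length) :
    list_homo G H = ((List.range (H.length ^ G.length)).map (pvDig H.length G.length)).filter
      (fun g => (edgesA G).all (pvOk H g)) := by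
  unfold list_homo
  rw [pv_genf G.length H.length hm, pv_foldl_if_filter]
  simp only [List.nil_append]
  rfl

lemma pv_B_side (G H : List (List Int)) (hm : 0 < H.length) :
    list_homo_alt G H = ((List.range (H.length ^ G.length)).map (pvDig H.length G.length)).filter
      (fun g => (edgesA G).all (pvOk H g)) := by
  unfold list_homo_alt
  simp only []
  rw [show edgesB G = edgesA G from rfl]
  rw [pv_dfs G H hm G.length [] (by simp)]
  simp only [List.nil_append, List.length_nil, Nat.zero_le, decide_true, List.filter_true]

-- ===== VERDICT (by name: the statement is the Claim_ definition above) =====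
theorem list_homo_spec : Claim_equal_list_homo := by
  intro G H _ hPre
  unfold Spec_list_homo
  rcases hPre with ⟨-, hGH, -⟩
  by_cases hH : H = []
  · have hG : G = [] := by
      rcases hGH with h | h
      · exact h
      · exact absurd hH h
    subst hG; subst hH; decide
  · have hm : 0 < H.length := List.length_pos_iff.mpr hH
    rw [pv_A_side G H hm, pv_B_side G H hm]
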